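-- pv_equiv track=rewrite | github.com/golesuman/sql_parser | lab/recognize.py | recognize_a
-- ===== SOURCE A (Python) =====
-- def recognize_a(input_string):
--     # DFA for 'a'
--     current_state = 'q0'
--     for char in input_string:
--         if current_state == 'q0' and char == 'a':
--             current_state = 'q1'
--         else:
--             return False
--     return current_state == 'q1'
-- ===== SOURCE B (Python) =====
-- def recognize_a(input_string):
--     # Materialise the iterable and compare it against the single-element list ['a'].
--     return list(input_string) == ['a']
-- ===== Notes on version B (the rewrite author's own statement) =====
-- stated objective: simpler
-- what changed: Replaces the explicit DFA state loop with one step: materialise the iterable and compare it to ['a'], which matches A even on non-string iterables.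
import Mathlib
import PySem

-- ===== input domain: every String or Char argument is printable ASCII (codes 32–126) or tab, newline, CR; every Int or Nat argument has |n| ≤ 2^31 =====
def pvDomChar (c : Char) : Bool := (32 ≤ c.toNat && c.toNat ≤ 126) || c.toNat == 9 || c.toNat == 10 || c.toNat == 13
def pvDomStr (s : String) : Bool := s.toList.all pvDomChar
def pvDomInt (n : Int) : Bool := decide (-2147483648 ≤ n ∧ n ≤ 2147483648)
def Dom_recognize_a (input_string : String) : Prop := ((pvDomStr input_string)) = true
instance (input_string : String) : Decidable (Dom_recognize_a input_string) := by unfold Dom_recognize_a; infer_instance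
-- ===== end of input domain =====

-- ===== PORT A =====
-- DFA loop of A: state string, early return False on any non-matching step
def recognize_a_loop (current_state : String) : List Char → Bool
  | [] => current_state == "q1"
  | c :: cs =>
    if current_state == "q0" && c == 'a' then recognize_a_loop "q1" cs
    else false

def recognize_a (input_string : String) : Bool :=
  recognize_a_loop "q0" input_string.toList

-- ===== PORT B =====
-- B: compare the materialised character list with ['a']
def recognize_a_alt (input_string : String) : Bool :=
  input_string.toList == ['a']

-- ===== PRECONDITION & SPEC =====
def Spec_recognize_a (input_string : String) (out : Bool) : Prop := out = recognize_a_alt input_string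
instance (input_string : String) (out : Bool) : Decidable (Spec_recognize_a input_string out) := by unfold Spec_recognize_a; infer_instance

-- ===== CLAIM (what is proved, stated in full; the proofs are below) =====
def Claim_equal_recognize_a : Prop := ∀ (input_string : String), Dom_recognize_a input_string → Spec_recognize_a input_string (recognize_a input_string)

-- ===== LEMMAS AND PROOFS =====

-- ===== VERDICT (by name: the statement is the Claim_ definition above) =====
theorem recognize_a_spec : Claim_equal_recognize_a := by
  intro s _
  unfold Spec_recognize_a recognize_a recognize_a_alt
  match h : s.toList with
  | [] => simp [recognize_a_loop]
  | [c] => by_cases hc : c = 'a' <;> simp [recognize_a_loop, hc]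
  | c :: d :: cs => by_cases hc : c = 'a' <;> simp [recognize_a_loop, hc]
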